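-- pv_equiv track=rewrite | github.com/daniel-reich/turbo-robot | oaN8o42vuzsdnCf4x_18.py | best_words
-- ===== SOURCE A (Python) =====
-- def best_words(lst):
--   score = {"a": 1, "c": 3, "b": 3, "e": 1, "d": 2, "g": 2,
--          "f": 4, "i": 1, "h": 4, "k": 5, "j": 8, "m": 3,
--          "l": 2, "o": 1, "n": 1, "q": 10, "p": 3, "s": 1,
--          "r": 1, "u": 1, "t": 1, "w": 4, "v": 4, "y": 4,
--          "x": 8, "z": 10}
--   def scoreWord(word):
--     return sum([score[i.lower()] for i in word])
--
--   highest = 0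
--   for i in range(len(lst)):
--     if scoreWord(lst[i]) > highest: highest = scoreWord(lst[i])
--
--   return [w for w in lst if scoreWord(w) == highest]
-- ===== SOURCE B (Python) =====
-- def best_words(lst):
--   pts = [1, 3, 3, 2, 1, 4, 2, 4, 1, 8, 5, 2, 3,
--          1, 1, 3, 10, 1, 1, 1, 1, 4, 4, 8, 4, 10]
--   groups = {}
--   for w in lst:
--     s = sum(pts[ord(c.lower()) - 97] for c in w)
--     groups.setdefault(s, []).append(w)
--   return groups[max(groups)] if groups else []
-- ===== Notes on version B (the rewrite author's own statement) =====
-- stated objective: alternative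
-- what changed: B replaces A's dict-keyed scoring plus running-max loop plus re-scanning filter (each word scored three times) by a flat 26-entry points array indexed by ord(c.lower())-97 and a single pass that buckets each word once into a score-keyed dict, returning the bucket of the maximum key.
import Mathlib
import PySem

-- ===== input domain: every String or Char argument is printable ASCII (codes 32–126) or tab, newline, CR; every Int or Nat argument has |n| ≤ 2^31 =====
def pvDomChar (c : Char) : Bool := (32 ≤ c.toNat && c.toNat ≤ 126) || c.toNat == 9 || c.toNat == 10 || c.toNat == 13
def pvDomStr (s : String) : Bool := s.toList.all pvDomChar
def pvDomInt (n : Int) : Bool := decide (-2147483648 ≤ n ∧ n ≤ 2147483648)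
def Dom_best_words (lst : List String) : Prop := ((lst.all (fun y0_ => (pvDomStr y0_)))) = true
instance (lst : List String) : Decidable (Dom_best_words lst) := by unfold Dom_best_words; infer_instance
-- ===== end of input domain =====

-- B buckets each word once into a score-keyed dict (points from a flat array indexed by
-- ord(c.lower())-97) and returns the max bucket, instead of A's dict-scored running-max loop
-- plus re-scanning filter (objective: alternative decomposition).


-- ===== PORT A =====
-- A's score dict, in A's literal order.
def pvScoreA : PySem.Dict Char Int := PySem.Dict.ofList
  [('a', 1), ('c', 3), ('b', 3), ('e', 1), ('d', 2), ('g', 2),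
   ('f', 4), ('i', 1), ('h', 4), ('k', 5), ('j', 8), ('m', 3),
   ('l', 2), ('o', 1), ('n', 1), ('q', 10), ('p', 3), ('s', 1),
   ('r', 1), ('u', 1), ('t', 1), ('w', 4), ('v', 4), ('y', 4),
   ('x', 8), ('z', 10)]

-- score[i.lower()] : getD 0 is exact under Pre_ (every char is a letter, so the key exists;
-- a missing key is Python's KeyError, excluded by Pre_).
def pvScoreWordA (w : String) : Int :=
  (w.toList.map (fun c => pvScoreA.getD (PySem.Chars.lowerChar c) 0)).sum

def best_words (lst : List String) : List String :=
  let highest :=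
    (PySem.List.pyRange 0 (PySem.List.len lst) 1).foldl
      (fun h i =>
        if pvScoreWordA (PySem.List.pyGetD lst i "") > h then
          pvScoreWordA (PySem.List.pyGetD lst i "")
        else h) 0
  lst.filter (fun w => pvScoreWordA w == highest)

-- ===== PORT B =====
-- B's flat points array, alphabetical (Source B's 'pts').
def pvPts : List Int :=
  [1, 3, 3, 2, 1, 4, 2, 4, 1, 8, 5, 2, 3,
   1, 1, 3, 10, 1, 1, 1, 1, 4, 4, 8, 4, 10]

-- pts[ord(c.lower()) - 97]; pyGetD 0 is exact under Pre_ (letters give index 0..25,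
-- elsewhere Python raises IndexError, excluded by Pre_).
def pvScoreWordB (w : String) : Int :=
  (w.toList.map (fun c =>
    PySem.List.pyGetD pvPts (((PySem.Chars.lowerChar c).toNat : Int) - 97) 0)).sum

-- groups.setdefault(s, []).append(w)  =  modify s [] (· ++ [w])
def best_words_alt (lst : List String) : List String :=
  let groups : PySem.Dict Int (List String) :=
    lst.foldl (fun d w => d.modify (pvScoreWordB w) [] (fun g => g ++ [w])) PySem.Dict.empty
  match PySem.List.max? (PySem.Dict.keys groups) (fun k => k) with
  | none => []                       -- 'if groups else []'
  | some m => groups.getD m []       -- groups[max(groups)]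

-- ===== PRECONDITION & SPEC =====
-- Pre_ excludes inputs containing a non-letter character, on which Python A raises KeyError
-- (score[c.lower()] has no entry); A returns normally exactly on letter-only words.
def Pre_best_words (lst : List String) : Prop :=
  (lst.all (fun w => w.toList.all PySem.Chars.isalpha)) = true
instance (lst : List String) : Decidable (Pre_best_words lst) := by
  unfold Pre_best_words; infer_instance

def pvWitness_best_words : List String := ["hello", "Quiz", "", "abc"]

def Spec_best_words (lst : List String) (out : List String) : Prop := out = best_words_alt lst
instance (lst : List String) (out : List String) : Decidable (Spec_best_words lst out) := by
  unfold Spec_best_words; infer_instance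

-- ===== CLAIM =====
def Claim_equal_best_words : Prop :=
  ∀ (lst : List String), Dom_best_words lst → Pre_best_words lst →
    Spec_best_words lst (best_words lst)

-- ===== LEMMAS AND PROOFS =====

-- finite check: the flat-array lookup agrees with the dict lookup on each lowercase letter
theorem pvLookup_eq (d : Char) (h1 : 97 ≤ d.toNat) (h2 : d.toNat ≤ 122) :
    PySem.List.pyGetD pvPts ((d.toNat : Int) - 97) 0 = pvScoreA.getD d 0 := by
  rcases (by omega : d.toNat = 97 ∨ d.toNat = 98 ∨ d.toNat = 99 ∨ d.toNat = 100 ∨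
      d.toNat = 101 ∨ d.toNat = 102 ∨ d.toNat = 103 ∨ d.toNat = 104 ∨ d.toNat = 105 ∨
      d.toNat = 106 ∨ d.toNat = 107 ∨ d.toNat = 108 ∨ d.toNat = 109 ∨ d.toNat = 110 ∨
      d.toNat = 111 ∨ d.toNat = 112 ∨ d.toNat = 113 ∨ d.toNat = 114 ∨ d.toNat = 115 ∨
      d.toNat = 116 ∨ d.toNat = 117 ∨ d.toNat = 118 ∨ d.toNat = 119 ∨ d.toNat = 120 ∨
      d.toNat = 121 ∨ d.toNat = 122) with
    hn|hn|hn|hn|hn|hn|hn|hn|hn|hn|hn|hn|hn|hn|hn|hn|hn|hn|hn|hn|hn|hn|hn|hn|hn|hn <;>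
    (rw [← Char.ofNat_toNat d, hn]; decide)

-- on a letter, lowerChar lands in 'a'..'z'
theorem pvLower_bounds (c : Char) (h : PySem.Chars.isalpha c = true) :
    97 ≤ (PySem.Chars.lowerChar c).toNat ∧ (PySem.Chars.lowerChar c).toNat ≤ 122 := by
  unfold PySem.Chars.lowerChar
  by_cases hu : PySem.Chars.isupper c = true
  · simp only [hu, if_true]
    simp [PySem.Chars.isupper, Char.le_def] at hu
    have h1 : 65 ≤ c.toNat := hu.1
    have h2 : c.toNat ≤ 90 := hu.2
    have hv : (c.toNat + 32).isValidChar := Or.inl (by omega)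
    rw [Char.toNat_ofNat, if_pos hv]
    omega
  · simp only [hu, Bool.false_eq_true, if_false]
    simp only [PySem.Chars.isalpha, Bool.or_eq_true] at h
    rcases h with h | h
    · exact absurd h hu
    · simp [PySem.Chars.islower, Char.le_def] at h
      exact ⟨h.1, h.2⟩

-- on a letter, the flat-array lookup agrees with the dict lookup
theorem pvScoreChar_eq (c : Char) (h : PySem.Chars.isalpha c = true) :
    PySem.List.pyGetD pvPts (((PySem.Chars.lowerChar c).toNat : Int) - 97) 0
      = pvScoreA.getD (PySem.Chars.lowerChar c) 0 := by
  obtain ⟨h1, h2⟩ := pvLower_bounds c h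
  exact pvLookup_eq _ h1 h2

theorem pvScore_eq (w : String) (h : w.toList.all PySem.Chars.isalpha = true) :
    pvScoreWordB w = pvScoreWordA w := by
  simp only [pvScoreWordA, pvScoreWordB]
  congr 1
  apply List.map_congr_left
  intro c hc
  exact pvScoreChar_eq c (by simpa using (List.all_eq_true.mp h c hc))

theorem pvScoreA_getD_nonneg (c : Char) : 0 ≤ pvScoreA.getD c 0 := by
  rw [PySem.Dict.getD_eq_get?_getD]
  cases h : pvScoreA.get? c with
  | none => simp
  | some v =>
    have hm := PySem.Dict.mem_items_of_get?_eq_some _ h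
    have hv : v ∈ pvScoreA.values := by
      simp only [PySem.Dict.values]
      exact List.mem_map_of_mem hm
    rw [show pvScoreA.values
        = [1, 3, 3, 1, 2, 2, 4, 1, 4, 5, 8, 3, 2, 1, 1, 10, 3, 1, 1, 1, 1, 4, 4, 4, 8, 10]
      from by decide] at hv
    simp only [List.mem_cons, List.not_mem_nil, or_false] at hv
    simp only [Option.getD_some]
    omega

theorem pvScore_nonneg (w : String) : 0 ≤ pvScoreWordA w := by
  apply List.sum_nonneg
  intro x hx
  simp only [List.mem_map] at hx
  obtain ⟨c, -, rfl⟩ := hx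
  exact pvScoreA_getD_nonneg _

-- the running-max loop of A: bounds and membership
theorem pvFoldMax_spec (f : String → Int) (l : List String) (init : Int) :
    (init ≤ l.foldl (fun h w => if f w > h then f w else h) init) ∧
    (∀ x ∈ l, f x ≤ l.foldl (fun h w => if f w > h then f w else h) init) ∧
    (l.foldl (fun h w => if f w > h then f w else h) init = init ∨
      ∃ x ∈ l, l.foldl (fun h w => if f w > h then f w else h) init = f x) := by
  induction l generalizing init with
  | nil => simp
  | cons a t ih =>
    simp only [List.foldl_cons, List.mem_cons]
    obtain ⟨h1, h2, h3⟩ := ih (if f a > init then f a else init)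
    refine ⟨?_, ?_, ?_⟩
    · exact le_trans (by split <;> omega) h1
    · rintro x (rfl | hx)
      · exact le_trans (by split <;> omega) h1
      · exact h2 x hx
    · rcases h3 with h3 | ⟨x, hx, h3⟩
      · by_cases hc : f a > init
        · exact Or.inr ⟨a, Or.inl rfl, by rw [h3, if_pos hc]⟩
        · exact Or.inl (by rw [h3, if_neg hc])
      · exact Or.inr ⟨x, Or.inr hx, h3⟩

-- B's bucket for key m is the filter of lst by B-score m
theorem pvGroups_getD (lst : List String) (m : Int) :
    ((lst.foldl (fun d w => d.modify (pvScoreWordB w) [] (fun g => g ++ [w]))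
        PySem.Dict.empty).getD m [])
      = lst.filter (fun w => pvScoreWordB w == m) := by
  have h := PySem.Dict.getD_foldl_modify_append
      (l := lst.map (fun w => (pvScoreWordB w, w))) (d := PySem.Dict.empty) (c := m)
  rw [List.foldl_map] at h
  rw [h]
  simp [List.filter_map, Function.comp_def]

-- B's keys are exactly the B-scores occurring in lst
theorem pvGroups_keys_mem (lst : List String) (k : Int) :
    k ∈ (lst.foldl (fun d w => d.modify (pvScoreWordB w) [] (fun g => g ++ [w]))
        PySem.Dict.empty).keys ↔ ∃ x ∈ lst, k = pvScoreWordB x := by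
  rw [PySem.Dict.keys_foldl_modify_key]
  simp [PySem.Set.mem_update, PySem.Dict.keys_empty, eq_comm]

theorem best_words_eq (lst : List String) (hpre : Pre_best_words lst) :
    best_words lst = best_words_alt lst := by
  have hsc : ∀ w ∈ lst, pvScoreWordA w = pvScoreWordB w := by
    intro w hw
    exact (pvScore_eq w (List.all_eq_true.mp hpre w hw)).symm
  simp only [best_words, best_words_alt]
  rw [PySem.List.foldl_pyRange_zero_pyGetD lst ""
      (fun h w => if pvScoreWordA w > h then pvScoreWordA w else h) 0]
  have hfold : lst.foldl (fun h w => if pvScoreWordA w > h then pvScoreWordA w else h) 0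
      = lst.foldl (fun h w => if pvScoreWordB w > h then pvScoreWordB w else h) 0 :=
    PySem.List.foldl_congr_mem lst _ _ 0 (by intro acc x hx; rw [hsc x hx])
  have hfilt : ∀ m : Int, lst.filter (fun w => pvScoreWordA w == m)
      = lst.filter (fun w => pvScoreWordB w == m) := fun m =>
    List.filter_congr (by intro x hx; rw [hsc x hx])
  rw [hfold, hfilt]
  obtain ⟨hH0, hHub, hHmem⟩ := pvFoldMax_spec pvScoreWordB lst 0
  cases hmax : PySem.List.max? ((lst.foldl (fun d w =>
      d.modify (pvScoreWordB w) [] (fun g => g ++ [w])) PySem.Dict.empty).keys)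
      (fun k => k) with
  | none =>
    rw [PySem.List.max?_eq_none_iff] at hmax
    have hnil : lst = [] := by
      cases lst with
      | nil => rfl
      | cons a t =>
        exfalso
        have : pvScoreWordB a ∈ ((a :: t).foldl (fun d w =>
            d.modify (pvScoreWordB w) [] (fun g => g ++ [w])) PySem.Dict.empty).keys :=
          (pvGroups_keys_mem (a :: t) _).mpr ⟨a, List.mem_cons_self, rfl⟩
        rw [hmax] at this
        exact (List.not_mem_nil) this
    subst hnil
    rfl
  | some m =>
    have hmK := PySem.List.max?_mem hmax
    obtain ⟨x, hx, hmx⟩ := (pvGroups_keys_mem lst m).mp hmK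
    have hub : ∀ y ∈ lst, pvScoreWordB y ≤ m := by
      intro y hy
      exact PySem.List.max?_isMax hmax _ ((pvGroups_keys_mem lst _).mpr ⟨y, hy, rfl⟩)
    have hHm : (lst.foldl (fun h w =>
        if pvScoreWordB w > h then pvScoreWordB w else h) 0) = m := by
      apply le_antisymm
      · rcases hHmem with h | ⟨z, hz, h⟩
        · rw [h, hmx, ← hsc x hx]; exact pvScore_nonneg x
        · rw [h]; exact hub z hz
      · rw [hmx]; exact hHub x hx
    rw [hHm]
    exact (pvGroups_getD lst m).symm

-- ===== VERDICT =====
theorem best_words_spec : Claim_equal_best_words := by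
  intro lst _ hpre
  exact best_words_eq lst hpre
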